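-- pv_equiv track=rewrite | github.com/LadyPary/DialDefer | code/aio_data_creation/verification-tool.py | compute_speaker_turns
-- ===== SOURCE A (Python) =====
-- from typing import Dict, List, Optional, Tuple
--
-- def compute_speaker_turns(messages: List[dict]) -> int:
--     last = None
--     turns = 0
--     for m in messages:
--         text = (m.get("text") or "")
--         if not isinstance(text, str) or text.strip() == "":
--             continue
--         sp = m.get("speaker", "")
--         if not isinstance(sp, str):
--             continue
--         if sp != last:
--             turns += 1
--             last = sp
--     return turns
-- ===== SOURCE B (Python) =====
-- from typing import List, Optional
--
-- def _valid_speaker(m: dict) -> Optional[str]: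
--     text = (m.get("text") or "")
--     if not isinstance(text, str) or text.strip() == "":
--         return None
--     sp = m.get("speaker", "")
--     if not isinstance(sp, str):
--         return None
--     return sp
--
-- def _dc(sp: List[str]):
--     # returns (number of maximal runs, first element, last element); sp non-empty
--     if len(sp) == 1:
--         return (1, sp[0], sp[0])
--     mid = len(sp) // 2
--     t1, f1, l1 = _dc(sp[:mid])
--     t2, f2, l2 = _dc(sp[mid:])
--     return (t1 + t2 - (1 if l1 == f2 else 0), f1, l2)
--
-- def compute_speaker_turns(messages: List[dict]) -> int:
--     speakers = [s for s in map(_valid_speaker, messages) if s is not None]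
--     if not speakers:
--         return 0
--     return _dc(speakers)[0]
-- ===== Notes on version B (the rewrite author's own statement) =====
-- stated objective: alternative
-- what changed: Replaces A's single-pass last-speaker state loop with a divide-and-conquer run counter: extract the valid speakers, recursively split the list in half, count runs in each half and merge by subtracting one when the boundary speakers of the two halves are equal.
import Mathlib
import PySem

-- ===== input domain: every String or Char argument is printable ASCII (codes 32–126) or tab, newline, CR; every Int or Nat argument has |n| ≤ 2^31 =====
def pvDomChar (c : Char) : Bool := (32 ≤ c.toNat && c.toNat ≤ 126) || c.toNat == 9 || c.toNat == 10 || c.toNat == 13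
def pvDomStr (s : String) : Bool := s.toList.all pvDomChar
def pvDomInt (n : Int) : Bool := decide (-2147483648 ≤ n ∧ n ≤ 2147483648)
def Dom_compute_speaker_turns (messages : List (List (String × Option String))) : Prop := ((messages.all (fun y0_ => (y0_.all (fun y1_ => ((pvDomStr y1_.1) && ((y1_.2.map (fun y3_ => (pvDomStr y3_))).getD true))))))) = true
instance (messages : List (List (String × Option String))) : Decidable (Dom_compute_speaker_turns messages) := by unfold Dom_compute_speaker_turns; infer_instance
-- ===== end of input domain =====

-- ===== PORT A =====
-- B replaces A's single-pass last-speaker loop with a divide-and-conquer run counter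
-- over the extracted speaker list (alternative decomposition; no speed claim).
-- One step of A's loop body (dict values are Option String: a str or None, so the
-- isinstance checks amount to matching on the Option; `text or ""` maps None/missing to "").
def pvStepA (st : Option String × Int) (m : List (String × Option String)) : Option String × Int :=
  let text : String := match PySem.Dict.get? (PySem.Dict.mk m) "text" with
    | some (some s) => s       -- (m.get("text") or ""): an empty str stays "" either way
    | _ => ""
  if PySem.Str.strip text = "" then st   -- `not isinstance(text, str)` never fires: text is a str here
  else
    match PySem.Dict.get? (PySem.Dict.mk m) "speaker" with
    | some none => st                    -- speaker is None: not a str → continue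
    | some (some sp) => if some sp ≠ st.1 then (some sp, st.2 + 1) else st
    | none => if some "" ≠ st.1 then (some "", st.2 + 1) else st   -- default ""

def compute_speaker_turns (messages : List (List (String × Option String))) : Int :=
  (messages.foldl pvStepA (none, 0)).2

-- ===== PORT B =====
-- _valid_speaker from Source B
def pvValidSpeaker? (m : List (String × Option String)) : Option String :=
  let text : String := match PySem.Dict.get? (PySem.Dict.mk m) "text" with
    | some (some s) => s
    | _ => ""
  if PySem.Str.strip text = "" then none
  else
    match PySem.Dict.get? (PySem.Dict.mk m) "speaker" with
    | some none => none
    | some (some sp) => some sp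
    | none => some ""

-- _dc from Source B: (number of maximal runs, first element, last element) of a non-empty list
def pvDC : List String → Int × String × String
  | [] => (0, "", "")                       -- unreachable in Source B (callers pass non-empty lists)
  | [a] => (1, a, a)
  | a :: b :: rest =>
      let sp := a :: b :: rest
      let mid := sp.length / 2
      let r1 := pvDC (sp.take mid)
      let r2 := pvDC (sp.drop mid)
      (r1.1 + r2.1 - (if r1.2.2 = r2.2.1 then 1 else 0), r1.2.1, r2.2.2)
termination_by sp => sp.length
decreasing_by
  · simp; omega
  · simp; omega

def compute_speaker_turns_alt (messages : List (List (String × Option String))) : Int :=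
  match messages.filterMap pvValidSpeaker? with
  | [] => 0
  | speakers => (pvDC speakers).1

-- ===== PRECONDITION & SPEC =====
def Spec_compute_speaker_turns (messages : List (List (String × Option String))) (out : Int) : Prop := out = compute_speaker_turns_alt messages
instance (messages : List (List (String × Option String))) (out : Int) : Decidable (Spec_compute_speaker_turns messages out) := by unfold Spec_compute_speaker_turns; infer_instance

-- ===== CLAIM (what is proved, stated in full; the proofs are below) =====
def Claim_equal_compute_speaker_turns : Prop := ∀ (messages : List (List (String × Option String))), Dom_compute_speaker_turns messages → Spec_compute_speaker_turns messages (compute_speaker_turns messages)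

-- ===== LEMMAS AND PROOFS =====

-- A's step, rephrased through B's speaker extractor.
theorem pvStepA_eq (st : Option String × Int) (m : List (String × Option String)) :
    pvStepA st m = match pvValidSpeaker? m with
      | none => st
      | some sp => if some sp ≠ st.1 then (some sp, st.2 + 1) else st := by
  unfold pvStepA pvValidSpeaker?
  rcases h : PySem.Dict.get? (PySem.Dict.mk m) "text" with _ | (_ | s) <;>
  rcases h2 : PySem.Dict.get? (PySem.Dict.mk m) "speaker" with _ | (_ | sp) <;>
  simp only [h, h2] <;> split_ifs <;> simp_all

-- A's loop restricted to the valid speakers.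
def pvStepS (st : Option String × Int) (sp : String) : Option String × Int :=
  if some sp ≠ st.1 then (some sp, st.2 + 1) else st

theorem foldl_stepA_filterMap (l : List (List (String × Option String))) (st : Option String × Int) :
    l.foldl pvStepA st = (l.filterMap pvValidSpeaker?).foldl pvStepS st := by
  induction l generalizing st with
  | nil => rfl
  | cons m rest ih =>
    rw [List.foldl_cons, pvStepA_eq]
    cases h : pvValidSpeaker? m with
    | none => simp [h, ih]
    | some sp => simp [h, ih, pvStepS]

-- The divide-and-conquer result characterises A's fold on a non-empty speaker list.
theorem pvDC_spec : ∀ (sp : List String), sp ≠ [] → ∀ (c : Option String) (t : Int),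
    sp.foldl pvStepS (c, t) =
      (some (pvDC sp).2.2,
       t + (pvDC sp).1 - (if c = some (pvDC sp).2.1 then 1 else 0)) := by
  intro sp
  induction sp using pvDC.induct with
  | case1 => intro h; simp at h
  | case2 a =>
    intro _ c t
    simp only [pvDC, List.foldl_cons, List.foldl_nil, pvStepS]
    split_ifs with h1 h2 h2 <;> simp_all
  | case3 a b rest spv midv ih1 ih2 =>
    intro _ c t
    have hlen : spv.length = rest.length + 2 := rfl
    have hmv : midv = spv.length / 2 := rfl
    have hx : spv.take midv ≠ [] := by
      rw [ne_eq, List.take_eq_nil_iff]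
      rintro (h | h)
      · omega
      · exact List.cons_ne_nil _ _ h
    have hy : spv.drop midv ≠ [] := by
      rw [ne_eq, List.drop_eq_nil_iff]
      omega
    have hdc : pvDC spv = ((pvDC (spv.take midv)).1 + (pvDC (spv.drop midv)).1 -
        (if (pvDC (spv.take midv)).2.2 = (pvDC (spv.drop midv)).2.1 then 1 else 0),
        (pvDC (spv.take midv)).2.1, (pvDC (spv.drop midv)).2.2) := by
      show pvDC (a :: b :: rest) = _
      rw [pvDC]
    show spv.foldl pvStepS (c, t) =
      (some (pvDC spv).2.2, t + (pvDC spv).1 - (if c = some (pvDC spv).2.1 then 1 else 0))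
    rw [hdc]
    conv_lhs => rw [(List.take_append_drop midv spv).symm]
    rw [List.foldl_append, ih1 hx c t, ih2 hy _ _]
    simp only [Prod.mk.injEq, true_and]
    split_ifs <;> simp_all <;> omega

-- ===== VERDICT (by name: the statement is the Claim_ definition above) =====
theorem compute_speaker_turns_spec : Claim_equal_compute_speaker_turns := by
  intro messages _
  unfold Spec_compute_speaker_turns compute_speaker_turns compute_speaker_turns_alt
  rw [foldl_stepA_filterMap]
  cases h : messages.filterMap pvValidSpeaker? with
  | nil => simp
  | cons s rest =>
    rw [pvDC_spec (s :: rest) (by simp) none 0]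
    simp
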